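-- pv_equiv track=rewrite | github.com/harrylyx/tree2code | scripts/pmml_real_data_check.py | _parse_models
-- ===== SOURCE A (Python) =====
-- from typing import Any, Dict, Iterable, List, Sequence
--
-- DEFAULT_MODELS = {
--     "xgb": "xgb_model.pkl",
--     "lgb": "lgb_model.pkl",
--     "all": "all_model.pkl",
-- }
--
-- def _parse_models(values: Iterable[str]) -> List[str]:
--     selected: List[str] = []
--     for value in values:
--         for item in value.split(","):
--             key = item.strip()
--             if not key:
--                 continue
--             if key == "all-models":
--                 keys = list(DEFAULT_MODELS)
--             elif key in DEFAULT_MODELS: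
--                 keys = [key]
--             else:
--                 allowed = ", ".join([*DEFAULT_MODELS, "all-models"])
--                 raise ValueError(f"Unknown model '{key}'. Allowed values: {allowed}")
--             for model_key in keys:
--                 if model_key not in selected:
--                     selected.append(model_key)
--     return selected
-- ===== SOURCE B (Python) =====
-- from typing import Iterable, List
--
-- DEFAULT_MODELS = {
--     "xgb": "xgb_model.pkl",
--     "lgb": "lgb_model.pkl",
--     "all": "all_model.pkl",
-- }
--
--
-- def _parse_models(values: Iterable[str]) -> List[str]:
--     # Flatten first: joining on "," and splitting once removes the nested loop.
--     keys: List[str] = []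
--     for item in ",".join(values).split(","):
--         key = item.strip()
--         if not key:
--             continue
--         if key == "all-models":
--             keys.extend(DEFAULT_MODELS)
--         elif key in DEFAULT_MODELS:
--             keys.append(key)
--         else:
--             allowed = ", ".join([*DEFAULT_MODELS, "all-models"])
--             raise ValueError(f"Unknown model '{key}'. Allowed values: {allowed}")
--     # Recover first-occurrence order by sorting the distinct keys by first index.
--     return sorted(set(keys), key=keys.index)
-- ===== Notes on version B (the rewrite author's own statement) =====
-- stated objective: alternative
-- what changed: A's nested loop that interleaves validation, 'all-models' expansion and membership-checked deduplicating appends is replaced by joining all values on ',' and splitting once (one flat loop, duplicates kept), then recovering the deduplicated first-occurrence order at the end via sorted(set(keys), key=keys.index).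
import Mathlib
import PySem

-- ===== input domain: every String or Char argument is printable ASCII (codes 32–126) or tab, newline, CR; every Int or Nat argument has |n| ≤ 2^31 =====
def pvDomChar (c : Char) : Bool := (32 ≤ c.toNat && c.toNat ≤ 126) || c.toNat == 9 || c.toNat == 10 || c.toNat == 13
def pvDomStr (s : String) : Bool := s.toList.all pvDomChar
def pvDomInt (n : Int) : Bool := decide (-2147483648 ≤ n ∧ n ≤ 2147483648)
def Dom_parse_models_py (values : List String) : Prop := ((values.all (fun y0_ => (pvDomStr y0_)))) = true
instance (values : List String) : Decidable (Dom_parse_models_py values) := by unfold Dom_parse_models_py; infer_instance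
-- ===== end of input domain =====

-- B replaces A's nested loop (dedup interleaved with expansion) by joining all values on ","
-- and splitting once, accumulating every expanded key with duplicates, then recovering the
-- deduplicated first-occurrence order with sorted(set(keys), key=keys.index); objective: alternative.

-- ===== PORT A =====
-- list(DEFAULT_MODELS): the dict's keys in insertion order
def pyDefaultModelKeys : List String := ["xgb", "lgb", "all"]

-- literal transliteration of A: nested loops, dedup interleaved with expansion
def parse_models_py (values : List String) : List String :=
  values.foldl (fun selected value =>
    ((PySem.Str.split? value ",").getD []).foldl (fun selected item =>
      let key := PySem.Str.strip item
      if key = "" then selected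
      else
        let keys :=
          if key = "all-models" then pyDefaultModelKeys
          else if pyDefaultModelKeys.contains key then [key]
          else []  -- Python: raise ValueError (excluded by Pre_parse_models_py)
        keys.foldl (fun sel mk => if sel.contains mk then sel else sel ++ [mk]) selected)
      selected) []

-- ===== PORT B =====
-- transliteration of B: join on "," and split once into a single flat token loop that
-- appends every expanded key (duplicates kept), then sorted(set(keys), key=keys.index)
def parse_models_py_alt (values : List String) : List String :=
  let toks := (PySem.Str.split? (PySem.Str.join "," values) ",").getD []
  let keys := toks.foldl (fun ks item =>
      let key := PySem.Str.strip item
      if key = "" then ks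
      else if key = "all-models" then ks ++ pyDefaultModelKeys
      else if pyDefaultModelKeys.contains key then ks ++ [key]
      else ks) []  -- Python: raise ValueError (excluded by Pre_parse_models_py)
  PySem.List.sorted (PySem.Set.ofList keys) (fun k => (PySem.List.index? keys k).getD 0) false

-- ===== PRECONDITION & SPEC =====
-- Pre_ excludes exactly the inputs containing a non-empty stripped token outside the allowed
-- key set, on which the Python A (and B) raise ValueError.
def Pre_parse_models_py (values : List String) : Prop :=
  ∀ v ∈ values, ∀ item ∈ (PySem.Str.split? v ",").getD [],
    PySem.Str.strip item = "" ∨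
      PySem.Str.strip item ∈ ["xgb", "lgb", "all", "all-models"]
instance (values : List String) : Decidable (Pre_parse_models_py values) := by
  unfold Pre_parse_models_py; infer_instance

def pvWitness_parse_models_py : List String := ["xgb, all-models", " lgb ,,"]

def Spec_parse_models_py (values : List String) (out : List String) : Prop := out = parse_models_py_alt values
instance (values : List String) (out : List String) : Decidable (Spec_parse_models_py values out) := by unfold Spec_parse_models_py; infer_instance

-- ===== CLAIM (what is proved, stated in full; the proofs are below) =====
def Claim_equal_parse_models_py : Prop := ∀ (values : List String), Dom_parse_models_py values → Pre_parse_models_py values → Spec_parse_models_py values (parse_models_py values)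

-- ===== LEMMAS AND PROOFS =====

-- token → list of produced model keys ("" and unknown tokens produce none)
def expandTok (item : String) : List String :=
  let key := PySem.Str.strip item
  if key = "" then []
  else if key = "all-models" then pyDefaultModelKeys
  else if pyDefaultModelKeys.contains key then [key]
  else []

-- simple recursive characterisation of splitting a char list on ','
def splitComma : List Char → List (List Char)
  | [] => [[]]
  | c :: rest =>
    if c = ',' then [] :: splitComma rest
    else match splitComma rest with
      | h :: t => (c :: h) :: t
      | [] => [[c]]

def consHead (x : List Char) : List (List Char) → List (List Char)
  | h :: t => (x ++ h) :: t
  | [] => [x]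

theorem splitComma_ne_nil (l : List Char) : splitComma l ≠ [] := by
  cases l with
  | nil => simp [splitComma]
  | cons c rest =>
    simp only [splitComma]
    split
    · simp
    · split <;> simp

theorem go_eq (l : List Char) : ∀ (fuel : Nat) (cur : List Char) (acc : List (List Char)),
    l.length < fuel →
    PySem.Chars.splitOn.go [','] fuel l cur acc = acc.reverse ++ consHead cur.reverse (splitComma l) := by
  induction l with
  | nil =>
    intro fuel cur acc h
    match fuel with
    | f + 1 => simp [PySem.Chars.splitOn.go, splitComma, consHead]
  | cons c rest ih =>
    intro fuel cur acc h
    match fuel with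
    | f + 1 =>
      rw [PySem.Chars.splitOn.go]
      by_cases hc : c = ','
      · subst hc
        have hp : [','].isPrefixOf (',' :: rest) = true := by simp [List.isPrefixOf]
        rw [if_pos hp]
        simp only [List.length_cons, List.length_nil, List.drop_succ_cons, List.drop_zero]
        rw [ih f [] (List.reverse cur :: acc) (by simpa using h)]
        cases hsc : splitComma rest with
        | nil => exact absurd hsc (splitComma_ne_nil rest)
        | cons h t => simp [splitComma, hsc, consHead]
      · have hp : ¬ ([','].isPrefixOf (c :: rest) = true) := by
          simp [List.isPrefixOf]; exact fun hcc => absurd hcc.symm hc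
        rw [if_neg hp, ih f (c :: cur) acc (by simpa using h)]
        cases hsc : splitComma rest with
        | nil => exact absurd hsc (splitComma_ne_nil rest)
        | cons h t => simp [splitComma, hc, hsc, consHead]

theorem splitOn_comma_eq (s : List Char) : PySem.Chars.splitOn s [','] = splitComma s := by
  rw [PySem.Chars.splitOn, go_eq s (s.length + 1) [] [] (by omega)]
  cases hsc : splitComma s with
  | nil => exact absurd hsc (splitComma_ne_nil s)
  | cons h t => simp [consHead]

theorem splitComma_append (a b : List Char) :
    splitComma (a ++ ',' :: b) = splitComma a ++ splitComma b := by
  induction a with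
  | nil => simp [splitComma]
  | cons c a' ih =>
    by_cases hc : c = ','
    · subst hc; simp [splitComma, ih]
    · simp only [List.cons_append, splitComma, if_neg hc, ih]
      cases hsc : splitComma a' with
      | nil => exact absurd hsc (splitComma_ne_nil a')
      | cons h t => simp

theorem splitComma_intercalate (ls : List (List Char)) (h : ls ≠ []) :
    splitComma (List.intercalate [','] ls) = ls.flatMap splitComma := by
  induction ls with
  | nil => exact absurd rfl h
  | cons x t ih =>
    cases t with
    | nil => simp [List.intercalate]
    | cons y t' =>
      have h1 : List.intercalate [','] (x :: y :: t') = x ++ ',' :: List.intercalate [','] (y :: t') := by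
        simp [List.intercalate, List.intersperse]
      rw [h1, splitComma_append, ih (by simp)]
      simp

-- splitting the comma-join of a nonempty list = concatenation of the per-value splits
theorem split_join (values : List String) (h : values ≠ []) :
    (PySem.Str.split? (PySem.Str.join "," values) ",").getD []
      = values.flatMap (fun v => (PySem.Str.split? v ",").getD []) := by
  have hv : ∀ v : String, (PySem.Str.split? v ",").getD [] = (splitComma v.toList).map String.ofList := by
    intro v
    simp [PySem.Str.split?, PySem.Chars.split?, splitOn_comma_eq]
  rw [hv, PySem.Str.join]
  have hl : (String.ofList (PySem.Chars.join ",".toList (values.map String.toList))).toList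
      = List.intercalate [','] (values.map String.toList) := by
    simp [PySem.Chars.join]
  rw [hl, splitComma_intercalate _ (by simpa using h), List.flatMap_map, List.map_flatMap]
  simp [hv]

-- folding 'add each expansion' equals folding add over the flattened list
theorem foldl_add_flatMap {α β : Type} [BEq β] (f : α → List β) :
    ∀ (l : List α) (sel : List β),
      l.foldl (fun s x => (f x).foldl PySem.Set.add s) sel
        = (l.flatMap f).foldl PySem.Set.add sel := by
  intro l
  induction l with
  | nil => intro sel; rfl
  | cons a t ih =>
    intro sel
    simp only [List.foldl_cons, List.flatMap_cons, List.foldl_append, ih]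

-- A's inner per-item step is exactly 'fold add over expandTok item'
theorem stepA_eq (sel : List String) (item : String) :
    (let key := PySem.Str.strip item
     if key = "" then sel
     else
       let keys :=
         if key = "all-models" then pyDefaultModelKeys
         else if pyDefaultModelKeys.contains key then [key]
         else []
       keys.foldl (fun s mk => if s.contains mk then s else s ++ [mk]) sel)
      = (expandTok item).foldl PySem.Set.add sel := by
  by_cases h : PySem.Str.strip item = ""
  · simp [h, expandTok]
  · simp only [h, if_false, expandTok]
    rfl

-- B's per-token step is exactly 'append expandTok item'
theorem stepB_eq (ks : List String) (item : String) :
    (let key := PySem.Str.strip item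
     if key = "" then ks
     else if key = "all-models" then ks ++ pyDefaultModelKeys
     else if pyDefaultModelKeys.contains key then ks ++ [key]
     else ks)
      = ks ++ expandTok item := by
  unfold expandTok
  by_cases h : PySem.Str.strip item = ""
  · simp [h]
  · simp only [h, if_false]
    split_ifs <;> simp

-- the A-side value: Set.ofList of the flat expanded key list
theorem parse_models_py_eq_ofList (values : List String) :
    parse_models_py values
      = PySem.Set.ofList (values.flatMap (fun v =>
          ((PySem.Str.split? v ",").getD []).flatMap expandTok)) := by
  unfold parse_models_py
  have h1 : ∀ sel v, ((PySem.Str.split? v ",").getD []).foldl (fun selected item =>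
      let key := PySem.Str.strip item
      if key = "" then selected
      else
        let keys :=
          if key = "all-models" then pyDefaultModelKeys
          else if pyDefaultModelKeys.contains key then [key]
          else []
        keys.foldl (fun sel mk => if sel.contains mk then sel else sel ++ [mk]) selected) sel
      = (((PySem.Str.split? v ",").getD []).flatMap expandTok).foldl PySem.Set.add sel := by
    intro sel v
    rw [← foldl_add_flatMap]
    exact PySem.List.foldl_congr_mem _ _ _ _ (fun acc x _ => stepA_eq acc x)
  rw [PySem.Set.ofList_eq_foldl, ← foldl_add_flatMap]
  exact PySem.List.foldl_congr_mem _ _ _ _ (fun acc v _ => h1 acc v)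

-- accumulating with an accumulator: what a foldl of Set.add over xs adds to s
theorem foldl_add_acc (xs : List String) : ∀ s : List String,
    xs.foldl PySem.Set.add s = s ++ (PySem.Set.ofList xs).filter (fun y => ¬ s.contains y) := by
  induction xs with
  | nil => intro s; simp [PySem.Set.ofList, PySem.Set.empty]
  | cons a t ih =>
    intro s
    have h1 : PySem.Set.ofList (a :: t) = t.foldl PySem.Set.add [a] := by
      simp [PySem.Set.ofList, PySem.Set.empty, List.foldl_cons, PySem.Set.add]
    rw [List.foldl_cons, ih (PySem.Set.add s a), h1, ih [a]]
    rw [List.filter_append, List.filter_filter]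
    by_cases hm : s.contains a
    · have has : a ∈ s := by simpa using hm
      have hadd : PySem.Set.add s a = s := by simp [PySem.Set.add, has]
      rw [hadd]
      have hf : [a].filter (fun y => ¬ s.contains y) = [] := by simp [has]
      rw [hf, List.nil_append]
      congr 1
      apply List.filter_congr
      intro y _
      simp only [List.contains_eq_mem, decide_eq_true_eq, List.mem_singleton, decide_not]
      by_cases hys : y ∈ s
      · simp [hys]
      · have : ¬ y = a := fun h => hys (h ▸ has)
        simp [hys, this]
    · have has : a ∉ s := by simpa using hm
      have hadd : PySem.Set.add s a = s ++ [a] := by simp [PySem.Set.add, has]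
      rw [hadd]
      have hf : [a].filter (fun y => ¬ s.contains y) = [a] := by simp [has]
      rw [hf, List.append_assoc]
      congr 2
      apply List.filter_congr
      intro y _
      by_cases hys : y ∈ s <;> by_cases hya : y = a <;> simp [hys, hya, has]

theorem ofList_cons (x : String) (xs : List String) :
    PySem.Set.ofList (x :: xs) = x :: (PySem.Set.ofList xs).filter (fun y => ¬ (y == x)) := by
  have h1 : PySem.Set.ofList (x :: xs) = xs.foldl PySem.Set.add [x] := by
    simp [PySem.Set.ofList, PySem.Set.empty, List.foldl_cons, PySem.Set.add]
  rw [h1, foldl_add_acc xs [x], List.singleton_append]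
  congr 1
  apply List.filter_congr
  intro y _
  simp only [List.contains_eq_mem, List.mem_singleton, beq_iff_eq, decide_not]
  simp

-- the deduplicated list is ordered by index of first occurrence
theorem pairwise_idxOf_ofList (xs : List String) :
    (PySem.Set.ofList xs).Pairwise (fun a b => xs.idxOf a < xs.idxOf b) := by
  induction xs with
  | nil => simp [PySem.Set.ofList, PySem.Set.empty]
  | cons x t ih =>
    rw [ofList_cons]
    refine List.Pairwise.cons ?_ ?_
    · intro b hb
      have hbx : ¬ (b == x) := by
        have := List.of_mem_filter hb
        simpa using this
      have : b ≠ x := by simpa using hbx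
      rw [List.idxOf_cons_self, List.idxOf_cons_ne _ (Ne.symm this)]
      omega
    · refine List.Pairwise.imp_of_mem ?_ (ih.filter _)
      intro a b ha hb hab
      have hax : a ≠ x := by have := List.of_mem_filter ha; simpa using this
      have hbx : b ≠ x := by have := List.of_mem_filter hb; simpa using this
      rw [List.idxOf_cons_ne _ (Ne.symm hax), List.idxOf_cons_ne _ (Ne.symm hbx)]
      omega

theorem idxOf?_getD (v : String) (xs : List String) (h : v ∈ xs) :
    (List.idxOf? v xs).getD 0 = xs.idxOf v := by
  have : List.idxOf? v xs = some (xs.idxOf v) := by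
    rw [List.idxOf?_eq_some_iff]
    refine ⟨List.idxOf_lt_length_iff.mpr h, List.getElem_idxOf _, ?_⟩
    intro j hj
    simpa using List.not_of_lt_findIdx (p := (· == v)) (xs := xs) hj
  simp [this]

-- sorting the distinct keys by first index reproduces first-occurrence order
theorem sorted_ofList_idx (l : List String) :
    PySem.List.sorted (PySem.Set.ofList l) (fun k => (PySem.List.index? l k).getD 0) false
      = PySem.Set.ofList l := by
  apply PySem.List.sorted_eq_of_perm_of_pairwise_lt _ _ _ (List.Perm.refl _)
  refine List.Pairwise.imp_of_mem ?_ (pairwise_idxOf_ofList l)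
  intro a b ha hb hlt
  have ha' : a ∈ l := (PySem.Set.mem_ofList l a).mp ha
  have hb' : b ∈ l := (PySem.Set.mem_ofList l b).mp hb
  simpa [PySem.List.index?, idxOf?_getD _ _ ha', idxOf?_getD _ _ hb'] using hlt

-- the B-side value, for nonempty input
theorem parse_models_py_alt_eq (values : List String) (h : values ≠ []) :
    parse_models_py_alt values
      = PySem.Set.ofList (values.flatMap (fun v =>
          ((PySem.Str.split? v ",").getD []).flatMap expandTok)) := by
  unfold parse_models_py_alt
  rw [split_join values h]
  have hkeys : ∀ (toks : List String), toks.foldl (fun ks item =>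
      let key := PySem.Str.strip item
      if key = "" then ks
      else if key = "all-models" then ks ++ pyDefaultModelKeys
      else if pyDefaultModelKeys.contains key then ks ++ [key]
      else ks) []
      = toks.flatMap expandTok := by
    intro toks
    calc _ = toks.foldl (fun ks item => ks ++ expandTok item) []
            := PySem.List.foldl_congr_mem _ _ _ _ (fun acc x _ => stepB_eq acc x)
      _ = [] ++ toks.flatMap expandTok := PySem.List.foldl_append_eq_flatMap _ _ _
      _ = _ := by simp
  simp only [hkeys, sorted_ofList_idx, List.flatMap_assoc]

-- ===== VERDICT (by name: the statement is the Claim_ definition above) =====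
theorem parse_models_py_spec : Claim_equal_parse_models_py := by
  intro values _ _
  unfold Spec_parse_models_py
  cases values with
  | nil => rfl
  | cons v vs =>
    rw [parse_models_py_eq_ofList, parse_models_py_alt_eq _ (by simp)]
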